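-- pv_equiv track=rewrite | github.com/ZckFreedom/Mathworks | db_sqence/simple_db.py | algorithm_B
-- ===== SOURCE A (Python) =====
-- def get_lexicographic_number(s_sequence):
-- 	"""
-- 	给定一个序列s，先得到序列的长度，并让序列循环两次
-- 	之后取得序列的包含的所有最后一位是1的状态
-- 	将状态按照字典序排列
-- 	最后得到原序列在状态表中的位置和该循环序列包含的最后一位是1的状态个数
-- 	"""
-- 	size = len(s_sequence)
-- 	s_sequence += s_sequence
--
-- 	states = []
-- 	for i in range(size):
-- 		if s_sequence[i:i + size] not in states and s_sequence[i + size - 1] == 1: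
-- 			states.append(s_sequence[i:i + size])
--
-- 	states.sort(reverse=True)
-- 	return states.index(s_sequence[:size]), len(states)
--
-- def algorithm_B(s_sequence, t_number):
-- 	state = None
-- 	retval = []
--
-- 	while state != s_sequence:
-- 		if state is None:
-- 			state = s_sequence[:]
--
-- 		k, m = get_lexicographic_number(state[1:] + [1])
-- 		if (m >= t_number and k == m - t_number) or (m < t_number and k == m - 1):
-- 			state = state[1:] + [1 - state[0]]
-- 		else:
-- 			state = state[1:] + [state[0]]
--
-- 		retval.append(state[-1])
--
-- 	return retval
-- ===== SOURCE B (Python) =====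
-- def algorithm_B(s_sequence, t_number):
--     def step(state):
--         # next bit for `state`: rank the rotation state[1:]+[1] among the
--         # distinct rotations ending in 1 by counting those <= it
--         w = state[1:] + [1]
--         size = len(w)
--         dd = w + w
--         rots = {tuple(dd[i:i + size]) for i in range(size)
--                 if dd[i + size - 1] == 1}
--         m = len(rots)
--         le = sum(r <= tuple(w) for r in rots)
--         if le == (t_number if t_number <= m else 1):
--             return 1 - state[0]
--         return state[0]
--
--     out = []
--     state = list(s_sequence)
--     while True:
--         b = step(state)
--         state = state[1:] + [b]
--         out.append(b)
--         if state == s_sequence: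
--             return out
-- ===== Notes on version B (the rewrite author's own statement) =====
-- stated objective: simpler
-- what changed: A's sort-then-index helper is replaced by a step function that builds the set of distinct rotations ending in 1 and decides the branch by counting rotations <= the target (so neither the sort nor the descending rank k is ever computed), and the main loop is a do-while that conses each emitted bit onto the result instead of appending to an accumulator list.
import Mathlib
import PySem

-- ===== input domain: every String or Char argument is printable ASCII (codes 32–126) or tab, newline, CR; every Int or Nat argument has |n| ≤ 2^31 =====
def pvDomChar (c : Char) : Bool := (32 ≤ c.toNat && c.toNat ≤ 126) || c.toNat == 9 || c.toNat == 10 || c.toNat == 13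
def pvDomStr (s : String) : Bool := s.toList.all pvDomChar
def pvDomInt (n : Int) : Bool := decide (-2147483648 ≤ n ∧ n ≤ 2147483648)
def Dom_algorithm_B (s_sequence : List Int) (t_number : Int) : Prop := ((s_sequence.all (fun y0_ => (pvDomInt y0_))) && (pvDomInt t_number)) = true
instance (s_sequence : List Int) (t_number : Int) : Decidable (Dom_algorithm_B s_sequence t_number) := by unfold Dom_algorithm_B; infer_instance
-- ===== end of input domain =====

-- B folds the helper into a `step` function that never sorts and never computes the
-- descending rank k: it counts the distinct qualifying rotations ≤ the target instead,
-- and the main loop builds the output front-to-back by cons (objective: simpler).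
-- Python A's helper mutates only its own freshly built argument, so no caller-visible mutation.
-- Both loop ports carry a fuel bound (the reachable state space is finite) solely to make
-- the while-loop total in Lean; it is a totalization guard and changes no computed value.

-- ===== PORT A =====
-- get_lexicographic_number of A: doubled list, dedup-on-append fold, sort descending, list.index
def pvGetLexA (s0 : List Int) : Int × Int :=
  let size := s0.length
  let s := s0 ++ s0            -- s_sequence += s_sequence (mutates A's local, fresh list)
  let states := (PySem.List.pyRange 0 (size : Int) 1).foldl
    (fun states i =>
      if PySem.List.slice s (some i) (some (i + (size : Int))) ∉ states ∧
         PySem.List.pyGetD s (i + (size : Int) - 1) 0 = 1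
      then states ++ [PySem.List.slice s (some i) (some (i + (size : Int)))]
      else states) []
  let sorted := PySem.List.sorted states (fun x => x) true
  ((((PySem.List.index? sorted (PySem.List.slice s none (some (size : Int)))).getD 0 : Nat) : Int),
   (sorted.length : Int))

def pvLoopA (s : List Int) (t : Int) : Nat → List Int → List Int → List Int
  | 0, _, retval => retval
  | fuel+1, state, retval =>
    let km := pvGetLexA (PySem.List.slice state (some 1) none ++ [1])
    let next := if (km.2 ≥ t ∧ km.1 = km.2 - t) ∨ (km.2 < t ∧ km.1 = km.2 - 1)
      then PySem.List.slice state (some 1) none ++ [1 - PySem.List.pyGetD state 0 0]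
      else PySem.List.slice state (some 1) none ++ [PySem.List.pyGetD state 0 0]
    let retval' := retval ++ [PySem.List.pyGetD next (-1) 0]
    if next = s then retval' else pvLoopA s t fuel next retval'

def algorithm_B (s_sequence : List Int) (t_number : Int) : List Int :=
  -- while-loop with fuel; first iteration always runs (state is None), so do-while from state = s_sequence[:]
  pvLoopA s_sequence t_number ((2 * s_sequence.length + 2) ^ s_sequence.length + 1) s_sequence []

-- ===== PORT B =====
-- step of B: distinct rotations ending in 1 as a set (nonnegative indices: List.range,
-- getD, drop/take are exact for Python's dd[i], dd[i:i+size] here), ranked by counting ≤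
def pvStepB (t : Int) (state : List Int) : Int :=
  let w := state.tail ++ [1]            -- state[1:] + [1] (nonneg slice = tail)
  let size := w.length
  let dd := w ++ w
  let rots : PySem.Set (List Int) := PySem.Set.ofList
    (((List.range size).filter (fun i => decide (dd.getD (i + size - 1) 0 = 1))).map
      (fun i => (dd.drop i).take size))
  let m := (rots.length : Int)
  let le := ((rots.countP (fun r => decide (r ≤ w)) : Nat) : Int)
  if le = (if t ≤ m then t else 1) then 1 - state.headD 0 else state.headD 0
  -- state.headD 0: state[0]; the loop keeps state nonempty for every nonempty input

def pvLoopB (s : List Int) (t : Int) : Nat → List Int → List Int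
  | 0, _ => []
  | fuel+1, state =>
    let b := pvStepB t state
    let next := state.tail ++ [b]
    if next = s then [b] else b :: pvLoopB s t fuel next

def algorithm_B_alt (s_sequence : List Int) (t_number : Int) : List Int :=
  pvLoopB s_sequence t_number ((2 * s_sequence.length + 2) ^ s_sequence.length + 1) s_sequence

-- ===== PRECONDITION & SPEC =====
-- Pre_ excludes only the empty list, on which Python A raises IndexError (state[0] of []).
def Pre_algorithm_B (s_sequence : List Int) (t_number : Int) : Prop := s_sequence ≠ []
instance (s_sequence : List Int) (t_number : Int) : Decidable (Pre_algorithm_B s_sequence t_number) := by unfold Pre_algorithm_B; infer_instance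

def pvWitness_algorithm_B : List Int × Int := ([0, 1], 1)

def Spec_algorithm_B (s_sequence : List Int) (t_number : Int) (out : List Int) : Prop := out = algorithm_B_alt s_sequence t_number
instance (s_sequence : List Int) (t_number : Int) (out : List Int) : Decidable (Spec_algorithm_B s_sequence t_number out) := by unfold Spec_algorithm_B; infer_instance

-- ===== CLAIM (what is proved, stated in full; the proofs are below) =====
def Claim_equal_algorithm_B : Prop := ∀ (s_sequence : List Int) (t_number : Int), Dom_algorithm_B s_sequence t_number → Pre_algorithm_B s_sequence t_number → Spec_algorithm_B s_sequence t_number (algorithm_B s_sequence t_number)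

-- ===== LEMMAS AND PROOFS =====

-- B's list of qualifying rotations of l ++ [1], named for the proofs
def rotsB (l : List Int) : List (List Int) :=
  ((List.range (l ++ [1]).length).filter
      (fun i => decide ((((l ++ [1]) ++ (l ++ [1])).getD (i + (l ++ [1]).length - 1) 0 = 1)))).map
    (fun i => (((l ++ [1]) ++ (l ++ [1])).drop i).take (l ++ [1]).length)

-- A's dedup-on-append fold over the range equals building a PySem.Set from the filtered, mapped range.
theorem pv_fold_eq_set (d : List Int) (sz : Int) (xs : List Int) (acc : List (List Int)) :
    xs.foldl (fun states i =>
        if PySem.List.slice d (some i) (some (i + sz)) ∉ states ∧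
           PySem.List.pyGetD d (i + sz - 1) 0 = 1
        then states ++ [PySem.List.slice d (some i) (some (i + sz))]
        else states) acc
      = ((xs.filter (fun i => decide (PySem.List.pyGetD d (i + sz - 1) 0 = 1))).map
          (fun i => PySem.List.slice d (some i) (some (i + sz)))).foldl PySem.Set.add acc := by
  induction xs generalizing acc with
  | nil => rfl
  | cons i xs ih =>
    by_cases hq : PySem.List.pyGetD d (i + sz - 1) 0 = 1
    · by_cases hm : PySem.List.slice d (some i) (some (i + sz)) ∈ acc
      · simp [hq, hm, ih]
      · simp [hq, hm, ih]
    · simp [hq, ih]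

-- A's filtered/mapped pyRange list IS rotsB (nonnegative indices)
theorem pv_lists_eq (l : List Int) :
    ((PySem.List.pyRange 0 (((l ++ [1]).length : Nat) : Int) 1).filter
        (fun i => decide (PySem.List.pyGetD ((l ++ [1]) ++ (l ++ [1])) (i + ((l ++ [1]).length : Int) - 1) 0 = 1))).map
      (fun i => PySem.List.slice ((l ++ [1]) ++ (l ++ [1])) (some i) (some (i + ((l ++ [1]).length : Int))))
    = rotsB l := by
  rw [PySem.List.pyRange_one]
  simp only [sub_zero, Int.toNat_natCast, zero_add]
  rw [List.filter_map, List.map_map]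
  unfold rotsB
  have hfil : (List.range (l ++ [1]).length).filter
      ((fun i => decide (PySem.List.pyGetD ((l ++ [1]) ++ (l ++ [1])) (i + ((l ++ [1]).length : Int) - 1) 0 = 1)) ∘ (fun k : Nat => (k : Int)))
      = (List.range (l ++ [1]).length).filter
        (fun i => decide ((((l ++ [1]) ++ (l ++ [1])).getD (i + (l ++ [1]).length - 1) 0 = 1))) := by
    apply List.filter_congr
    intro k _
    simp only [Function.comp]
    have hc : (k : Int) + ((l ++ [1]).length : Int) - 1 = ((k + (l ++ [1]).length - 1 : Nat) : Int) := by
      have : 1 ≤ (l ++ [1]).length := by simp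
      omega
    rw [hc, PySem.List.pyGetD_natCast]
  rw [hfil]
  apply List.map_congr_left
  intro k _
  simp only [Function.comp]
  rw [PySem.List.slice_natCast_add]

-- the original w = l ++ [1] appears among rotsB l (the rotation at i = 0 ends in 1)
theorem pv_mem_rotsB (l : List Int) : (l ++ [1]) ∈ rotsB l := by
  unfold rotsB
  apply List.mem_map.mpr
  refine ⟨0, List.mem_filter.mpr ⟨?_, ?_⟩, ?_⟩
  · exact List.mem_range.mpr (by simp)
  · simp only [decide_eq_true_eq, Nat.zero_add]
    have h2 : (l ++ [1]).length - 1 < (l ++ [1]).length := by simp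
    rw [List.getD_append _ _ _ _ h2]
    have : (l ++ [1]).length - 1 = l.length := by simp
    rw [this]
    rw [List.getD_eq_getElem?_getD, List.getElem?_append_right (le_refl _)]
    simp
  · rw [List.drop_zero, List.take_left]

-- rank in a strictly descending list = number of strictly greater elements
theorem pv_rank (x : List Int) : ∀ ys : List (List Int),
    ys.Pairwise (fun a b => b < a) → x ∈ ys →
    PySem.List.index? ys x = some (ys.countP (fun r => decide (x < r))) := by
  intro ys
  induction ys with
  | nil => intro _ h; cases h
  | cons y t ih =>
    intro hp hmem
    rcases List.pairwise_cons.mp hp with ⟨hhd, htl⟩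
    by_cases hyx : y = x
    · subst hyx
      rw [PySem.List.index?_cons_self]
      have h0 : t.countP (fun r => decide (y < r)) = 0 := by
        apply List.countP_eq_zero.mpr
        intro r hr
        simp only [decide_eq_true_eq]
        exact fun hlt => absurd hlt (not_lt_of_gt (hhd r hr))
      simp [h0]
    · have hxt : x ∈ t := (List.mem_cons.mp hmem).resolve_left (fun h => hyx h.symm)
      rw [PySem.List.index?_cons_of_ne t hyx, ih htl hxt]
      have hxy : x < y := hhd x hxt
      simp [hxy]

-- the sorted(reverse=True) of a nodup list is strictly descending
theorem pv_sorted_strict (xs : List (List Int)) (h : xs.Nodup) :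
    (PySem.List.sorted xs (fun x => x) true).Pairwise (fun a b => b < a) := by
  have hperm : (PySem.List.sorted xs (fun x => x) true).Perm xs :=
    PySem.List.sorted_perm xs _ true
  have hnd : (PySem.List.sorted xs (fun x => x) true).Nodup := hperm.nodup_iff.mpr h
  have hp : (PySem.List.sorted xs (fun x => x) true).Pairwise (fun a b => b ≤ a) := by
    have := PySem.List.sorted_pairwise_rev (κ := List Int) xs (fun x => x)
    convert this using 2
  exact (hp.and hnd).imp (fun {a b} ⟨hle, hne⟩ => lt_of_le_of_ne hle (Ne.symm hne))

-- A's helper on l ++ [1], characterised over B's rotation set: (count greater, count all)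
theorem pv_lexA_char (l : List Int) :
    pvGetLexA (l ++ [1]) =
      (((PySem.Set.ofList (rotsB l)).countP (fun r => decide ((l ++ [1]) < r)) : Int),
       ((PySem.Set.ofList (rotsB l)).length : Int)) := by
  unfold pvGetLexA
  dsimp only
  rw [pv_fold_eq_set, ← PySem.Set.ofList_eq_foldl, pv_lists_eq]
  have htgt : PySem.List.slice ((l ++ [1]) ++ (l ++ [1])) none (some (((l ++ [1]).length : Nat) : Int)) = l ++ [1] := by
    rw [PySem.List.slice_to_natCast, List.take_left]
  rw [htgt]
  have hmemS : (l ++ [1]) ∈ PySem.List.sorted (PySem.Set.ofList (rotsB l)) (fun x => x) true :=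
    (PySem.List.mem_sorted _ _ _ _).mpr ((PySem.Set.mem_ofList _ _).mpr (pv_mem_rotsB l))
  rw [pv_rank (l ++ [1]) _ (pv_sorted_strict _ (PySem.Set.nodup_ofList _)) hmemS]
  have hperm : (PySem.List.sorted (PySem.Set.ofList (rotsB l)) (fun x => x) true).Perm (PySem.Set.ofList (rotsB l)) :=
    PySem.List.sorted_perm _ _ true
  rw [hperm.countP_eq, PySem.List.length_sorted]
  rfl

-- count(≤ w) + count(> w) = count all, on any list of rotations
theorem pv_le_add_gt (w : List Int) (xs : List (List Int)) :
    xs.countP (fun r => decide (r ≤ w)) + xs.countP (fun r => decide (w < r)) = xs.length := by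
  induction xs with
  | nil => rfl
  | cons x t ih =>
    by_cases h : x ≤ w
    · simp [h, not_lt_of_ge h]; omega
    · simp [h, lt_of_not_ge h]; omega

-- the two branch conditions agree, and A's appended bit equals B's step value
theorem pv_step_eq (t : Int) (state : List Int) :
    (let km := pvGetLexA (state.tail ++ [1]);
     if (km.2 ≥ t ∧ km.1 = km.2 - t) ∨ (km.2 < t ∧ km.1 = km.2 - 1)
     then 1 - PySem.List.pyGetD state 0 0 else PySem.List.pyGetD state 0 0)
    = pvStepB t state := by
  have hget : PySem.List.pyGetD state 0 0 = state.headD 0 := by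
    rw [PySem.List.pyGetD_zero]; cases state <;> rfl
  have hle := pv_le_add_gt (state.tail ++ [1]) (PySem.Set.ofList (rotsB state.tail))
  show (let km := pvGetLexA (state.tail ++ [1]); _) = _
  rw [pv_lexA_char state.tail]
  unfold pvStepB
  dsimp only
  rw [← rotsB.eq_def]
  set k := (PySem.Set.ofList (rotsB state.tail)).countP (fun r => decide ((state.tail ++ [1]) < r)) with hk
  set le := (PySem.Set.ofList (rotsB state.tail)).countP (fun r => decide (r ≤ (state.tail ++ [1]))) with hle'
  set m := (PySem.Set.ofList (rotsB state.tail)).length with hm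
  rw [hget]
  have hiff : (((m : Int) ≥ t ∧ (k : Int) = (m : Int) - t) ∨ ((m : Int) < t ∧ (k : Int) = (m : Int) - 1))
      ↔ ((le : Int) = if t ≤ (m : Int) then t else 1) := by
    by_cases h : t ≤ (m : Int)
    · rw [if_pos h]; omega
    · rw [if_neg h]; omega
  by_cases hc : (le : Int) = if t ≤ (m : Int) then t else 1
  · rw [if_pos (hiff.mpr hc), if_pos hc]
  · rw [if_neg (fun h => hc (hiff.mp h)), if_neg hc]

-- the two loop shapes agree: A's append-accumulator equals retval ++ B's cons-built list
theorem pv_loop_eq (s : List Int) (t : Int) :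
    ∀ fuel state retval, pvLoopA s t fuel state retval = retval ++ pvLoopB s t fuel state := by
  intro fuel
  induction fuel with
  | zero => intro state retval; simp [pvLoopA, pvLoopB]
  | succ n ih =>
    intro state retval
    have hslice : PySem.List.slice state (some 1) none = state.tail :=
      PySem.List.slice_from_one state
    have hstep := pv_step_eq t state
    simp only at hstep
    simp only [pvLoopA, pvLoopB, hslice]
    have hout : (if ((pvGetLexA (state.tail ++ [1])).2 ≥ t ∧ (pvGetLexA (state.tail ++ [1])).1 = (pvGetLexA (state.tail ++ [1])).2 - t) ∨
           ((pvGetLexA (state.tail ++ [1])).2 < t ∧ (pvGetLexA (state.tail ++ [1])).1 = (pvGetLexA (state.tail ++ [1])).2 - 1)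
        then state.tail ++ [1 - PySem.List.pyGetD state 0 0]
        else state.tail ++ [PySem.List.pyGetD state 0 0]) = state.tail ++ [pvStepB t state] := by
      rw [← hstep]
      split_ifs <;> rfl
    rw [hout, PySem.List.pyGetD_neg_one_append_singleton]
    by_cases hns : state.tail ++ [pvStepB t state] = s
    · rw [if_pos hns, if_pos hns]
    · rw [if_neg hns, if_neg hns, ih]
      simp

-- ===== VERDICT (by name: the statement is the Claim_ definition above) =====
theorem algorithm_B_spec : Claim_equal_algorithm_B := by
  intro s t _ _
  unfold Spec_algorithm_B algorithm_B algorithm_B_alt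
  rw [pv_loop_eq]
  simp
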